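-- pv_equiv track=rewrite | github.com/Rishpan/CS683-PokerAgentProject | lucas_agents/learnable_agent_v0/abstraction.py | history_bucket
-- ===== SOURCE A (Python) =====
-- STREETS = ("preflop", "flop", "turn", "river")
--
-- def history_bucket(action_histories, street):
--   """Return a compact 0..7 public betting-pattern bucket.
--
--   The first six buckets describe the current street action shape. The last two
--   buckets are used when an earlier street already contained aggression and the
--   current street is either still quiet/passive or already aggressive.
--   """
--   prior = _prior_street_aggression(action_histories, street)
--   encoded = [_encode_action(action.get("action")) for action in action_histories.get(street, [])]
--   encoded = [move for move in encoded if move in {"r", "c"}]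
--   current_raises = encoded.count("r")
--
--   if prior:
--     return 7 if current_raises > 0 else 6
--   if not encoded:
--     return 0
--   passive_count = encoded.count("c")
--   if current_raises >= 2:
--     return 5
--   if current_raises == 0:
--     return 1
--   if passive_count == 0:
--     return 2
--   first_raise = encoded.index("r")
--   return 3 if first_raise > 0 else 4
--
-- def _encode_action(move):
--   move = (move or "").lower()
--   if move == "raise":
--     return "r"
--   if move in {"call", "check"}:
--     return "c"
--   if move == "fold":
--     return "f"
--   if move in {"smallblind", "bigblind", "ante", "straddle"}:
--     return ""
--   return ""
--
-- def _prior_street_aggression(action_histories, street):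
--   for name in STREETS:
--     if name == street:
--       break
--     if _current_street_raises(action_histories, name) > 0:
--       return 1
--   return 0
--
-- def _current_street_raises(action_histories, street):
--   raise_count = 0
--   for action in action_histories.get(street, []):
--     if _encode_action(action.get("action")) == "r":
--       raise_count += 1
--   return raise_count
-- ===== SOURCE B (Python) =====
-- STREETS = ("preflop", "flop", "turn", "river")
--
-- def history_bucket(action_histories, street):
--     # prior-street aggression: any raise on a street strictly before `street`
--     prior = False
--     for name in STREETS:
--         if name == street:
--             break
--         if not prior and any(_enc(a.get("action")) == "r" for a in action_histories.get(name, [])):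
--             prior = True
--     # one aggregation pass over the current street
--     raises = calls = 0
--     first_pos = -1
--     for a in action_histories.get(street, []):
--         m = _enc(a.get("action"))
--         if m == "r":
--             if raises == 0:
--                 first_pos = raises + calls
--             raises += 1
--         elif m == "c":
--             calls += 1
--     if prior:
--         return 7 if raises > 0 else 6
--     if raises + calls == 0:
--         return 0
--     if raises >= 2:
--         return 5
--     if raises == 0:
--         return 1
--     if calls == 0:
--         return 2
--     return 3 if first_pos > 0 else 4
--
-- def _enc(move):
--     m = (move or "").lower()
--     if m == "raise":
--         return "r"
--     if m in ("call", "check"):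
--         return "c"
--     return ""
-- ===== Notes on version B (the rewrite author's own statement) =====
-- stated objective: alternative
-- what changed: B replaces A's encode-map + filter comprehension and three separate .count/.count/.index scans of the current street with a single aggregation loop maintaining (raise_count, call_count, first_raise_pos), and replaces the per-street raise-counting helper by a short-circuit any(); the final decision tree is then applied to the aggregated counters.
import Mathlib
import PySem

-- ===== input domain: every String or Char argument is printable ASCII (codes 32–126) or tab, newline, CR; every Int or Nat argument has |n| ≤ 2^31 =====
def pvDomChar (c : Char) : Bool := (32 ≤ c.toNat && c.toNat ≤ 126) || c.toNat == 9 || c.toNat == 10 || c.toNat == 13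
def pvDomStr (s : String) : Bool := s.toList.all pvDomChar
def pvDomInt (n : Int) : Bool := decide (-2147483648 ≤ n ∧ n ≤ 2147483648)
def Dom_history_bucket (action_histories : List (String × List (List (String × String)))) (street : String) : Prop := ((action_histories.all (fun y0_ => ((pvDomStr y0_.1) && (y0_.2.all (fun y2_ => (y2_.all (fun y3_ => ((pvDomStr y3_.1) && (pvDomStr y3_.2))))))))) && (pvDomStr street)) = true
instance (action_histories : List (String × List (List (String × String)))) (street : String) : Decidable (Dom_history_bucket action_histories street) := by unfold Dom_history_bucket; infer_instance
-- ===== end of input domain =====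

-- B replaces A's comprehension + filter + three separate .count/.index scans of the street's
-- actions by one aggregation loop keeping (raises, calls, first_raise_pos); objective: alternative/simpler single pass.

-- ===== PORT A =====
def pvStreets : List String := ["preflop", "flop", "turn", "river"]

-- _encode_action
def pvEncCore (m : String) : String :=
  if m = "raise" then "r"
  else if m = "call" ∨ m = "check" then "c"
  else if m = "fold" then "f"
  else if m = "smallblind" ∨ m = "bigblind" ∨ m = "ante" ∨ m = "straddle" then ""
  else ""

def pvEncode (move : Option String) : String :=
  pvEncCore (PySem.Str.lower (move.getD ""))

-- _current_street_raises
def pvStreetRaises (action_histories : List (String × List (List (String × String)))) (street : String) : Int :=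
  (PySem.Dict.getD (PySem.Dict.mk action_histories) street []).foldl
    (fun rc a => if pvEncode (PySem.Dict.get? (PySem.Dict.mk a) "action") = "r" then rc + 1 else rc) 0

-- _prior_street_aggression (loop with break/early return)
def pvPriorAux (action_histories : List (String × List (List (String × String)))) (street : String) : List String → Int
  | [] => 0
  | n :: rest =>
      if n = street then 0
      else if pvStreetRaises action_histories n > 0 then 1
      else pvPriorAux action_histories street rest

def history_bucket (action_histories : List (String × List (List (String × String)))) (street : String) : Int :=
  let prior := pvPriorAux action_histories street pvStreets
  let encoded0 := (PySem.Dict.getD (PySem.Dict.mk action_histories) street []).map (fun a => pvEncode (PySem.Dict.get? (PySem.Dict.mk a) "action"))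
  let encoded := encoded0.filter (fun m => m = "r" ∨ m = "c")
  let current_raises : Int := (PySem.List.count encoded "r" : Int)
  if prior ≠ 0 then (if current_raises > 0 then 7 else 6)
  else if encoded = [] then 0
  else
    let passive_count : Int := (PySem.List.count encoded "c" : Int)
    if current_raises ≥ 2 then 5
    else if current_raises = 0 then 1
    else if passive_count = 0 then 2
    else
      -- encoded.index("r"): ValueError (none) is unreachable here since current_raises ≠ 0
      match PySem.List.index? encoded "r" with
      | some k => if (k : Int) > 0 then 3 else 4
      | none => 4

-- ===== PORT B =====
def altStreets : List String := ["preflop", "flop", "turn", "river"]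

-- _enc
def altEncCore (m : String) : String :=
  if m = "raise" then "r"
  else if m = "call" ∨ m = "check" then "c"
  else ""

def altEnc (move : Option String) : String :=
  altEncCore (PySem.Str.lower (move.getD ""))

-- prior loop: accumulator version of `if not prior and any(...)`
def altPriorAux (action_histories : List (String × List (List (String × String)))) (street : String) : List String → Bool → Bool
  | [], p => p
  | n :: rest, p =>
      if n = street then p
      else altPriorAux action_histories street rest
        (p || (PySem.Dict.getD (PySem.Dict.mk action_histories) n []).any (fun a => altEnc (PySem.Dict.get? (PySem.Dict.mk a) "action") = "r"))

-- one aggregation step: state = (raises, calls, first_pos)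
def altStep (s : Int × Int × Int) (a : List (String × String)) : Int × Int × Int :=
  let m := altEnc (PySem.Dict.get? (PySem.Dict.mk a) "action")
  if m = "r" then
    (s.1 + 1, s.2.1, if s.1 = 0 then s.1 + s.2.1 else s.2.2)
  else if m = "c" then (s.1, s.2.1 + 1, s.2.2)
  else s

def history_bucket_alt (action_histories : List (String × List (List (String × String)))) (street : String) : Int :=
  let prior := altPriorAux action_histories street altStreets false
  let s := (PySem.Dict.getD (PySem.Dict.mk action_histories) street []).foldl altStep (0, 0, -1)
  let raises := s.1
  let calls := s.2.1
  let first_pos := s.2.2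
  if prior then (if raises > 0 then 7 else 6)
  else if raises + calls = 0 then 0
  else if raises ≥ 2 then 5
  else if raises = 0 then 1
  else if calls = 0 then 2
  else if first_pos > 0 then 3 else 4

-- ===== PRECONDITION & SPEC =====
def Spec_history_bucket (action_histories : List (String × List (List (String × String)))) (street : String) (out : Int) : Prop := out = history_bucket_alt action_histories street
instance (action_histories : List (String × List (List (String × String)))) (street : String) (out : Int) : Decidable (Spec_history_bucket action_histories street out) := by unfold Spec_history_bucket; infer_instance

-- ===== CLAIM (what is proved, stated in full; the proofs are below) =====
def Claim_equal_history_bucket : Prop := ∀ (action_histories : List (String × List (List (String × String)))) (street : String), Dom_history_bucket action_histories street → Spec_history_bucket action_histories street (history_bucket action_histories street)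

-- ===== LEMMAS AND PROOFS =====


lemma enc_cases (mv : Option String) :
    (pvEncode mv = "r" ∧ altEnc mv = "r") ∨ (pvEncode mv = "c" ∧ altEnc mv = "c") ∨
    (pvEncode mv ≠ "r" ∧ pvEncode mv ≠ "c" ∧ altEnc mv ≠ "r" ∧ altEnc mv ≠ "c") := by
  unfold pvEncode altEnc pvEncCore altEncCore
  split_ifs <;> simp_all

-- current-street move of an action, A-side, and A's filtered encoded street list
def encA (a : List (String × String)) : String := pvEncode (PySem.Dict.get? (PySem.Dict.mk a) "action")
def encE (l : List (List (String × String))) : List String := (l.map encA).filter (fun m => m = "r" ∨ m = "c")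

lemma encE_nil : encE [] = [] := rfl

lemma encE_mem {l m} (h : m ∈ encE l) : m = "r" ∨ m = "c" := by
  have := List.of_mem_filter h
  simpa using this

lemma count_rc (E : List String) (h : ∀ m ∈ E, m = "r" ∨ m = "c") :
    E.count "r" + E.count "c" = E.length := by
  induction E with
  | nil => rfl
  | cons x xs ih =>
      have hx := h x (by simp)
      have ih' := ih (fun m hm => h m (by simp [hm]))
      rcases hx with h | h <;> subst h <;>
        simp only [List.count_cons, List.length_cons] <;> simp <;> omega

lemma encE_counts (l : List (List (String × String))) :
    (encE l).count "r" + (encE l).count "c" = (encE l).length :=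
  count_rc _ (fun _ hm => encE_mem hm)

-- A's raise count as a countP, and its positivity as B's any
lemma raises_pos_iff (ah : List (String × List (List (String × String)))) (n : String) :
    (0 < pvStreetRaises ah n) ↔
      ((PySem.Dict.getD (PySem.Dict.mk ah) n []).any
        (fun a => altEnc (PySem.Dict.get? (PySem.Dict.mk a) "action") = "r") = true) := by
  unfold pvStreetRaises
  rw [PySem.List.foldl_ite_add_one]
  simp only [List.any_eq_true, decide_eq_true_eq]
  constructor
  · intro h
    have : 0 < (PySem.Dict.getD (PySem.Dict.mk ah) n []).countP
        (fun a => decide (pvEncode (PySem.Dict.get? (PySem.Dict.mk a) "action") = "r")) := by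
      omega
    obtain ⟨a, ha, hp⟩ := List.countP_pos_iff.mp this
    exact ⟨a, ha, by
      have hr : pvEncode (PySem.Dict.get? (PySem.Dict.mk a) "action") = "r" := by simpa using hp
      rcases enc_cases (PySem.Dict.get? (PySem.Dict.mk a) "action") with ⟨_, h2⟩ | ⟨h1, _⟩ | ⟨h1, _, _, _⟩
      · exact h2
      · rw [hr] at h1; simp at h1
      · exact absurd hr h1⟩
  · rintro ⟨a, ha, hb⟩
    have hr : pvEncode (PySem.Dict.get? (PySem.Dict.mk a) "action") = "r" := by
      rcases enc_cases (PySem.Dict.get? (PySem.Dict.mk a) "action") with ⟨h1, _⟩ | ⟨_, h2⟩ | ⟨_, _, h3, _⟩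
      · exact h1
      · rw [hb] at h2; simp at h2
      · exact absurd hb h3
    have : 0 < (PySem.Dict.getD (PySem.Dict.mk ah) n []).countP
        (fun a => decide (pvEncode (PySem.Dict.get? (PySem.Dict.mk a) "action") = "r")) :=
      List.countP_pos_iff.mpr ⟨a, ha, by simpa using hr⟩
    omega

lemma prior_eq (ah : List (String × List (List (String × String)))) (street : String) :
    ∀ (names : List String) (p : Bool),
      altPriorAux ah street names p = (p || decide (pvPriorAux ah street names = 1)) := by
  intro names
  induction names with
  | nil => intro p; simp [altPriorAux, pvPriorAux]
  | cons n rest ih =>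
      intro p
      by_cases hs : n = street
      · simp [altPriorAux, pvPriorAux, hs]
      · by_cases hr : 0 < pvStreetRaises ah n
        · have hb := (raises_pos_iff ah n).mp hr
          simp [altPriorAux, pvPriorAux, hs, hr, hb, ih]
        · have hb : ((PySem.Dict.getD (PySem.Dict.mk ah) n []).any
              (fun a => altEnc (PySem.Dict.get? (PySem.Dict.mk a) "action") = "r")) = false := by
            rcases Bool.eq_false_or_eq_true ((PySem.Dict.getD (PySem.Dict.mk ah) n []).any
              (fun a => altEnc (PySem.Dict.get? (PySem.Dict.mk a) "action") = "r")) with h | h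
            · exact absurd ((raises_pos_iff ah n).mpr h) hr
            · exact h
          simp [altPriorAux, pvPriorAux, hs, hr, hb, ih]

lemma prior_01 (ah : List (String × List (List (String × String)))) (street : String) :
    ∀ names : List String, pvPriorAux ah street names = 0 ∨ pvPriorAux ah street names = 1 := by
  intro names
  induction names with
  | nil => left; rfl
  | cons n rest ih =>
      by_cases hs : n = street
      · left; simp [pvPriorAux, hs]
      · by_cases hr : 0 < pvStreetRaises ah n
        · right; simp [pvPriorAux, hs, hr]
        · simpa [pvPriorAux, hs, hr] using ih

lemma fold_inv (l : List (List (String × String))) :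
    ∀ r c f : Int, 0 ≤ r → 0 ≤ c →
      l.foldl altStep (r, c, f) =
        (r + ((encE l).count "r" : Int), c + ((encE l).count "c" : Int),
         if r = 0 ∧ "r" ∈ encE l then c + (((PySem.List.index? (encE l) "r").getD 0 : Nat) : Int) else f) := by
  induction l with
  | nil => intro r c f _ _; simp [encE_nil]
  | cons a l ih =>
      intro r c f hr hc
      rcases enc_cases (PySem.Dict.get? (PySem.Dict.mk a) "action") with ⟨hA, hB⟩ | ⟨hA, hB⟩ | ⟨hA1, hA2, hB1, hB2⟩
      · -- current move encodes to "r"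
        have hE : encE (a :: l) = "r" :: encE l := by
          simp [encE, encA, hA]
        have hstep : List.foldl altStep (r, c, f) (a :: l) =
            List.foldl altStep (r + 1, c, if r = 0 then r + c else f) l := by
          simp [List.foldl_cons, altStep, hB]
        rw [hstep, ih _ _ _ (by omega) hc]
        by_cases h0 : r = 0
        · subst h0
          simp [hE, Prod.ext_iff]
          omega
        · simp [hE, h0, Prod.ext_iff]
          constructor
          · omega
          · intro h; omega
      · -- current move encodes to "c"
        have hE : encE (a :: l) = "c" :: encE l := by
          simp [encE, encA, hA]
        have hstep : List.foldl altStep (r, c, f) (a :: l) =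
            List.foldl altStep (r, c + 1, f) l := by
          simp [altStep, hB]
        rw [hstep, ih r (c+1) f hr (by omega)]
        rw [hE]
        simp only [List.count_cons]
        by_cases hm : "r" ∈ encE l
        · obtain ⟨k, hk⟩ := Option.isSome_iff_exists.mp ((PySem.List.index?_isSome_iff _ _).mpr hm)
          rw [PySem.List.index?_cons_of_ne (encE l) (by decide), hk]
          simp [hm, Prod.ext_iff]
          split_ifs <;> omega
        · have hm' : "r" ∉ ("c" :: encE l) := by simp [hm]
          simp [hm, hm', Prod.ext_iff]
          omega
      · -- move filtered out
        have hE : encE (a :: l) = encE l := by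
          simp [encE, encA, hA1, hA2]
        have hstep : List.foldl altStep (r, c, f) (a :: l) = List.foldl altStep (r, c, f) l := by
          simp [altStep, hB1, hB2]
        rw [hstep, ih r c f hr hc, hE]

-- ===== VERDICT (by name: the statement is the Claim_ definition above) =====
theorem history_bucket_spec : Claim_equal_history_bucket := by
  intro ah street _
  unfold Spec_history_bucket history_bucket history_bucket_alt
  dsimp only
  rw [fold_inv _ 0 0 (-1) le_rfl le_rfl]
  set L := PySem.Dict.getD (PySem.Dict.mk ah) street [] with hL
  have hEdef : (L.map (fun a => pvEncode (PySem.Dict.get? (PySem.Dict.mk a) "action"))).filter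
      (fun m => m = "r" ∨ m = "c") = encE L := rfl
  rw [hEdef]
  set E := encE L with hEd
  -- prior sides agree
  have hp := prior_eq ah street pvStreets false
  have h01 := prior_01 ah street pvStreets
  rw [show altStreets = pvStreets from rfl, hp]
  simp only [Bool.false_or, decide_eq_true_eq]
  have hcount : (PySem.List.count E "r" : Int) = ((E.count "r" : Nat) : Int) := by
    simp [PySem.List.count_eq]
  have hcountc : (PySem.List.count E "c" : Int) = ((E.count "c" : Nat) : Int) := by
    simp [PySem.List.count_eq]
  have hlen := encE_counts L
  by_cases hprior : pvPriorAux ah street pvStreets = 1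
  · simp [hprior]
  · have h0 : pvPriorAux ah street pvStreets = 0 := h01.resolve_right hprior
    simp only [h0, ne_eq, not_true_eq_false, if_false, zero_add, hcount, hcountc]
    by_cases hE0 : E = []
    · simp [hE0]
    · have hlenpos : 0 < E.length := List.length_pos_iff.mpr hE0
      have hsum : E.count "r" + E.count "c" = E.length := hlen
      have hne : ¬ (((E.count "r" : Nat) : Int) + ((E.count "c" : Nat) : Int) = 0) := by omega
      simp only [hE0, if_false, hne]
      by_cases h5 : (2:Int) ≤ ((E.count "r" : Nat) : Int)
      · simp [h5]
      · simp only [ge_iff_le, h5, if_false]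
        by_cases hcr0 : ((E.count "r" : Nat) : Int) = 0
        · simp [hcr0]
        · simp only [hcr0, if_false]
          by_cases hcc0 : ((E.count "c" : Nat) : Int) = 0
          · simp [hcc0]
          · simp only [hcc0, if_false]
            have hmem : "r" ∈ E := by
              have : 0 < E.count "r" := by omega
              exact List.count_pos_iff.mp this
            obtain ⟨k, hk⟩ := Option.isSome_iff_exists.mp ((PySem.List.index?_isSome_iff _ _).mpr hmem)
            rw [hk]
            simp [hmem]
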